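-- pv_equiv track=rewrite | github.com/zhenzhiwin/pccsite | ccL7.py | judgeTheDeleteEntry
-- ===== SOURCE A (Python) =====
-- def judgeTheDeleteEntry(express, serviceAddress, servicePort, ety):
--     if express == "":
--         for line in ety:
--             if "expression 1" in line:
--                 return False
--     else:
--         for line in ety:
--             if "expression 1" in line and express not in line:
--                 return False
--
--     if serviceAddress == "":
--         for line in ety:
--             if "server-address" in line:
--                 return False
--     else:
--         for line in ety:
--             if "server-address" in line and serviceAddress not in line:
--                 return False
--
--     if servicePort == "":
--         for line in ety:
--             if "server-port" in line:
--                 return False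
--     else:
--         for line in ety:
--             if "server-port" in line and servicePort not in line:
--                 return False
--
--     return True
-- ===== SOURCE B (Python) =====
-- def judgeTheDeleteEntry(express, serviceAddress, servicePort, ety):
--     filters = [("expression 1", express),
--                ("server-address", serviceAddress),
--                ("server-port", servicePort)]
--     for line in ety:
--         for marker, value in filters:
--             if marker in line and (value == "" or value not in line):
--                 return False
--     return True
-- ===== Notes on version B (the rewrite author's own statement) =====
-- stated objective: simpler
-- what changed: Replaces six sequential branch-selected scans of ety with one data-driven pass that tests each line against a table of (marker, filter) pairs, folding the empty/non-empty filter cases into one condition.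
import Mathlib
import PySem

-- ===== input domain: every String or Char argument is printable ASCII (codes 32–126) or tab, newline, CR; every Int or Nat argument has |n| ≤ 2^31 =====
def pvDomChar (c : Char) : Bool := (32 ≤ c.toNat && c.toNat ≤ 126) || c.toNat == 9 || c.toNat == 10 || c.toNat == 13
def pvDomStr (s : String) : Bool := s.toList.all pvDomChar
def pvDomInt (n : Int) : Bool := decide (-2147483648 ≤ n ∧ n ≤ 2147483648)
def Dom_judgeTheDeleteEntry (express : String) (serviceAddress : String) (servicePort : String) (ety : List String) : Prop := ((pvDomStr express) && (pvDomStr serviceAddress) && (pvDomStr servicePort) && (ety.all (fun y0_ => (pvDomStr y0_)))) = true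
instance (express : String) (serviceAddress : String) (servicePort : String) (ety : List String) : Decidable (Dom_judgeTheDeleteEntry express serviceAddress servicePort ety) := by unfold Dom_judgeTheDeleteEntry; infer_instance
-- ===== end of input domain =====

-- B merges A's six branch-selected scans into one data-driven pass over ety with a table of (marker, filter) pairs (objective: simpler).

-- ===== PORT A =====
-- A's 'if marker in line: return False' loop (the empty-filter branches)
def pvScanMarker (marker : String) : List String → Bool
  | [] => true
  | line :: rest =>
    if PySem.Str.isIn marker line then false else pvScanMarker marker rest

-- A's 'if marker in line and filt not in line: return False' loop (the non-empty-filter branches)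
def pvScanFilt (marker filt : String) : List String → Bool
  | [] => true
  | line :: rest =>
    if PySem.Str.isIn marker line && !(PySem.Str.isIn filt line) then false
    else pvScanFilt marker filt rest

def judgeTheDeleteEntry (express : String) (serviceAddress : String) (servicePort : String) (ety : List String) : Bool :=
  if (if express == "" then pvScanMarker "expression 1" ety
      else pvScanFilt "expression 1" express ety) = false then false
  else if (if serviceAddress == "" then pvScanMarker "server-address" ety
           else pvScanFilt "server-address" serviceAddress ety) = false then false
  else if (if servicePort == "" then pvScanMarker "server-port" ety
           else pvScanFilt "server-port" servicePort ety) = false then false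
  else true

-- ===== PORT B =====
-- one line fails if some (marker, value) pair rejects it
def pvLineBad (pairs : List (String × String)) (line : String) : Bool :=
  pairs.any (fun p => PySem.Str.isIn p.1 line && (p.2 == "" || !(PySem.Str.isIn p.2 line)))

def pvBLoop (pairs : List (String × String)) : List String → Bool
  | [] => true
  | line :: rest => if pvLineBad pairs line then false else pvBLoop pairs rest

def judgeTheDeleteEntry_alt (express : String) (serviceAddress : String) (servicePort : String) (ety : List String) : Bool :=
  pvBLoop [("expression 1", express), ("server-address", serviceAddress), ("server-port", servicePort)] ety

-- ===== PRECONDITION & SPEC =====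
def Spec_judgeTheDeleteEntry (express : String) (serviceAddress : String) (servicePort : String) (ety : List String) (out : Bool) : Prop := out = judgeTheDeleteEntry_alt express serviceAddress servicePort ety
instance (express : String) (serviceAddress : String) (servicePort : String) (ety : List String) (out : Bool) : Decidable (Spec_judgeTheDeleteEntry express serviceAddress servicePort ety out) := by unfold Spec_judgeTheDeleteEntry; infer_instance

-- ===== CLAIM (what is proved, stated in full; the proofs are below) =====
def Claim_equal_judgeTheDeleteEntry : Prop := ∀ (express : String) (serviceAddress : String) (servicePort : String) (ety : List String), Dom_judgeTheDeleteEntry express serviceAddress servicePort ety → Spec_judgeTheDeleteEntry express serviceAddress servicePort ety (judgeTheDeleteEntry express serviceAddress servicePort ety)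

-- ===== LEMMAS AND PROOFS =====

-- per-line verdict of A's chosen loop, as List.all
theorem pvScanMarker_eq_all (marker : String) (ety : List String) :
    pvScanMarker marker ety = ety.all (fun l => !(PySem.Str.isIn marker l)) := by
  induction ety with
  | nil => rfl
  | cons line rest ih =>
    simp only [pvScanMarker, List.all_cons, ih]
    cases PySem.Str.isIn marker line <;> simp

theorem pvScanFilt_eq_all (marker filt : String) (ety : List String) :
    pvScanFilt marker filt ety
      = ety.all (fun l => !(PySem.Str.isIn marker l && !(PySem.Str.isIn filt l))) := by
  induction ety with
  | nil => rfl
  | cons line rest ih =>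
    simp only [pvScanFilt, List.all_cons, ih]
    cases PySem.Str.isIn marker line && !(PySem.Str.isIn filt line) <;> simp

theorem pvBLoop_eq_all (pairs : List (String × String)) (ety : List String) :
    pvBLoop pairs ety = ety.all (fun l => !(pvLineBad pairs l)) := by
  induction ety with
  | nil => rfl
  | cons line rest ih =>
    simp only [pvBLoop, List.all_cons, ih]
    cases pvLineBad pairs line <;> simp

theorem pvAnd3_all (f g h : String → Bool) (ety : List String) :
    ety.all (fun l => f l && (g l && h l)) = (ety.all f && (ety.all g && ety.all h)) := by
  induction ety with
  | nil => rfl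
  | cons line rest ih =>
    simp only [List.all_cons, ih]
    cases f line <;> cases g line <;> cases h line <;> simp

-- ===== VERDICT (by name: the statement is the Claim_ definition above) =====
theorem judgeTheDeleteEntry_spec : Claim_equal_judgeTheDeleteEntry := by
  intro express serviceAddress servicePort ety _
  unfold Spec_judgeTheDeleteEntry judgeTheDeleteEntry judgeTheDeleteEntry_alt
  rw [pvBLoop_eq_all]
  have hB : (fun l => !(pvLineBad [("expression 1", express), ("server-address", serviceAddress),
      ("server-port", servicePort)] l))
      = fun l => (!(PySem.Str.isIn "expression 1" l && (express == "" || !(PySem.Str.isIn express l))))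
          && ((!(PySem.Str.isIn "server-address" l && (serviceAddress == "" || !(PySem.Str.isIn serviceAddress l))))
          && (!(PySem.Str.isIn "server-port" l && (servicePort == "" || !(PySem.Str.isIn servicePort l))))) := by
    funext l
    simp only [pvLineBad, List.any_cons, List.any_nil, Bool.or_false, Bool.not_or]
  rw [hB, pvAnd3_all]
  have key : ∀ (filt : String) (marker : String),
      (if filt == "" then pvScanMarker marker ety else pvScanFilt marker filt ety)
        = ety.all (fun l => !(PySem.Str.isIn marker l && (filt == "" || !(PySem.Str.isIn filt l)))) := by
    intro filt marker
    cases hf : (filt == "") with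
    | true =>
      simp only [if_true, pvScanMarker_eq_all, Bool.true_or, Bool.and_true]
    | false =>
      simp only [Bool.false_eq_true, if_false, pvScanFilt_eq_all, Bool.false_or]
  rw [key express "expression 1", key serviceAddress "server-address", key servicePort "server-port"]
  cases ety.all (fun l => !(PySem.Str.isIn "expression 1" l && (express == "" || !(PySem.Str.isIn express l)))) <;>
  cases ety.all (fun l => !(PySem.Str.isIn "server-address" l && (serviceAddress == "" || !(PySem.Str.isIn serviceAddress l)))) <;>
  cases ety.all (fun l => !(PySem.Str.isIn "server-port" l && (servicePort == "" || !(PySem.Str.isIn servicePort l)))) <;> simp
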